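-- pv_equiv track=rewrite | github.com/rheeeuro/baekjoon-hub | 프로그래머스/2/250136. ［PCCP 기출문제］ 2번 ／ 석유 시추/［PCCP 기출문제］ 2번 ／ 석유 시추.py | solution
-- ===== SOURCE A (Python) =====
-- from collections import deque
--
-- direction = [[0, 1], [1, 0], [-1, 0], [0, -1]]
--
-- def isValid(i, j, n, m):
--     return 0 <= i < n and 0 <= j < m
--
-- def solution(land):
--     n = len(land)
--     m = len(land[0])
--     visited = [[False] * m for _ in range(n)]
--     countArr = [0] * m
--     q = deque([])
--     for i in range(n):
--         for j in range(m):
--             if land[i][j] == 1 and visited[i][j] == False: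
--                 count = 0
--                 minIndex = j
--                 maxIndex = j
--                 q.append([i, j])
--                 while len(q) > 0:
--                     cur = q.popleft()
--                     if visited[cur[0]][cur[1]]:
--                         continue
--                     visited[cur[0]][cur[1]] = True
--                     minIndex = min(minIndex, cur[1])
--                     maxIndex = max(maxIndex, cur[1])
--                     count += 1
--                     for d in direction:
--                         newI = cur[0] + d[0]
--                         newJ = cur[1] + d[1]
--                         if isValid(newI, newJ, n, m) and visited[newI][newJ] == False and land[newI][newJ] == 1:
--                             q.append([newI, newJ])
--                 for idx in range(minIndex, maxIndex+1):
--                     countArr[idx] += count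
--
--     return max(countArr)
-- ===== SOURCE B (Python) =====
-- def solution(land):
--     n = len(land)
--     m = len(land[0])
--     countArr = [0] * m
--     visited = set()
--     for i in range(n):
--         for j in range(m):
--             if land[i][j] == 1 and (i, j) not in visited:
--                 # saturate the component of (i, j) by whole-set expansion to a fixpoint
--                 comp = {(i, j)}
--                 while True:
--                     grown = {(ci + di, cj + dj)
--                              for (ci, cj) in comp
--                              for (di, dj) in ((0, 1), (1, 0), (-1, 0), (0, -1))
--                              if 0 <= ci + di < n and 0 <= cj + dj < m
--                              and land[ci + di][cj + dj] == 1} - comp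
--                     if not grown:
--                         break
--                     comp |= grown
--                 visited |= comp
--                 cnt = len(comp)
--                 lo = min(c for (_, c) in comp)
--                 hi = max(c for (_, c) in comp)
--                 for idx in range(lo, hi + 1):
--                     countArr[idx] += cnt
--     return max(countArr)
-- ===== Notes on version B (the rewrite author's own statement) =====
-- stated objective: alternative
-- what changed: Replaces the queue-based BFS flood fill (with visited matrix and re-check at pop) by a whole-set fixpoint saturation: each component is grown by repeatedly unioning in the oil neighbours of the current set until stable, and the count/min/max column statistics are read off the finished component set instead of being accumulated per popped cell.
-- outside the precondition, e.g. on solution([]): A raises IndexError, B raises IndexError; on solution([[]]): A raises ValueError, B raises ValueError; on solution([[1, 1], [1]]): A raises IndexError, B raises IndexError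
import Mathlib
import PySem

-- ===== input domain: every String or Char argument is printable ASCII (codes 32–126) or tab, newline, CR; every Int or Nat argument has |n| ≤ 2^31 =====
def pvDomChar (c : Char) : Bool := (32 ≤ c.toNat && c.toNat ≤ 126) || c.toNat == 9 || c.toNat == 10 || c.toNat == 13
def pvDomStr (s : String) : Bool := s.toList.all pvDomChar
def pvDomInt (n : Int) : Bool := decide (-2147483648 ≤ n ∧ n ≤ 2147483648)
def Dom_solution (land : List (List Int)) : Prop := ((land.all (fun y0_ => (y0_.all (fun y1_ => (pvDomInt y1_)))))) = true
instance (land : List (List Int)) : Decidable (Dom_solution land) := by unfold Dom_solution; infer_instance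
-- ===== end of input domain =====

-- B replaces A's queue BFS by whole-set fixpoint saturation per component (alternative algorithm, not claimed faster).

-- ===== PORT A =====
-- land[i][j] (read only where Python reads it in range — Pre_ excludes the ragged grids on which Python raises)
def landGet (land : List (List Int)) (i j : Int) : Int :=
  (PySem.List.pyGet? ((PySem.List.pyGet? land i).getD []) j).getD 0

-- countArr[idx] += cnt for idx in range(lo, hi+1)  (the identical final loop of both Pythons)
def bumpRange (arr : List Int) (lo hi cnt : Int) : List Int :=
  (PySem.List.pyRange lo (hi + 1) 1).foldl
    (fun a idx => a.set idx.toNat ((PySem.List.pyGet? a idx).getD 0 + cnt)) arr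

def direction : List (Int × Int) := [(0, 1), (1, 0), (-1, 0), (0, -1)]

def isValid (i j n m : Int) : Bool := decide (0 ≤ i ∧ i < n) && decide (0 ≤ j ∧ j < m)

-- visited[i][j] (indices in range whenever Python executes these)
def vget (v : List (List Bool)) (i j : Int) : Bool :=
  ((PySem.List.pyGet? ((PySem.List.pyGet? v i).getD []) j).getD false)

def vset (v : List (List Bool)) (i j : Int) : List (List Bool) :=
  v.set i.toNat (((PySem.List.pyGet? v i).getD []).set j.toNat true)

-- the `while len(q) > 0` loop; fuel only for termination, never exhausted on any reachable state (proved below)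
def bfsLoop (land : List (List Int)) (n m : Int) :
    Nat → List (List Bool) → List (Int × Int) → Int → Int → Int →
    List (List Bool) × Int × Int × Int
  | 0, v, _, count, mn, mx => (v, count, mn, mx)
  | _ + 1, v, [], count, mn, mx => (v, count, mn, mx)
  | fuel + 1, v, c :: q, count, mn, mx =>
    if vget v c.1 c.2 then bfsLoop land n m fuel v q count mn mx
    else
      let v' := vset v c.1 c.2
      let nbrs := direction.filterMap (fun d =>
        let ni := c.1 + d.1
        let nj := c.2 + d.2
        if isValid ni nj n m && !(vget v' ni nj) && (landGet land ni nj == 1)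
        then some (ni, nj) else none)
      bfsLoop land n m fuel v' (q ++ nbrs) (count + 1) (min mn c.2) (max mx c.2)

def solution (land : List (List Int)) : Int :=
  let n : Int := land.length
  let m : Int := (((PySem.List.pyGet? land 0).getD []).length : Int)
  let init : List (List Bool) × List Int :=
    (List.replicate n.toNat (List.replicate m.toNat false), List.replicate m.toNat 0)
  let res := (PySem.List.pyRange 0 n 1).foldl (fun st i =>
    (PySem.List.pyRange 0 m 1).foldl (fun st j =>
      if landGet land i j == 1 && !(vget st.1 i j) then
        let r := bfsLoop land n m (5 * (n.toNat * m.toNat) + 1) st.1 [(i, j)] 0 j j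
        (r.1, bumpRange st.2 r.2.2.1 r.2.2.2 r.2.1)
      else st) st) init
  (PySem.List.max? res.2 (fun x => x)).getD 0

-- ===== PORT B =====
-- one saturation round: the set comprehension {(ci+di, cj+dj) | …} - comp
def growB (land : List (List Int)) (n m : Int) (comp : PySem.Set (Int × Int)) :
    PySem.Set (Int × Int) :=
  PySem.Set.diff (PySem.Set.ofList (comp.flatMap (fun c =>
    ([(0, 1), (1, 0), (-1, 0), (0, -1)] : List (Int × Int)).filterMap (fun d =>
      let ni := c.1 + d.1
      let nj := c.2 + d.2
      if decide (0 ≤ ni ∧ ni < n) && decide (0 ≤ nj ∧ nj < m) && (landGet land ni nj == 1)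
      then some (ni, nj) else none)))) comp

-- the `while True` loop; fuel only for termination (each round strictly grows comp inside the n×m grid; proved below)
def saturate (land : List (List Int)) (n m : Int) :
    Nat → PySem.Set (Int × Int) → PySem.Set (Int × Int)
  | 0, comp => comp
  | fuel + 1, comp =>
    let g := growB land n m comp
    if g.isEmpty then comp else saturate land n m fuel (PySem.Set.union comp g)

def solution_alt (land : List (List Int)) : Int :=
  let n : Int := land.length
  let m : Int := (((PySem.List.pyGet? land 0).getD []).length : Int)
  let res := (PySem.List.pyRange 0 n 1).foldl
    (fun (st : PySem.Set (Int × Int) × List Int) i =>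
    (PySem.List.pyRange 0 m 1).foldl (fun st j =>
      if landGet land i j == 1 && !(PySem.Set.contains st.1 (i, j)) then
        let comp := saturate land n m (n.toNat * m.toNat + 1) (PySem.Set.ofList [(i, j)])
        let cnt : Int := comp.length
        let lo := (PySem.List.min? (comp.map Prod.snd) (fun x => x)).getD 0
        let hi := (PySem.List.max? (comp.map Prod.snd) (fun x => x)).getD 0
        (PySem.Set.union st.1 comp, bumpRange st.2 lo hi cnt)
      else st) st) (PySem.Set.empty, List.replicate m.toNat 0)
  (PySem.List.max? res.2 (fun x => x)).getD 0

-- ===== PRECONDITION & SPEC =====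
-- Pre_ excludes exactly the inputs on which the Python A raises: the empty grid and grids whose first
-- row is empty (max([]) → ValueError) or that have a row shorter than the first (IndexError).
def Pre_solution (land : List (List Int)) : Prop :=
  land ≠ [] ∧ ((PySem.List.pyGet? land 0).getD []) ≠ [] ∧
  ∀ row ∈ land, ((PySem.List.pyGet? land 0).getD []).length ≤ row.length
instance (land : List (List Int)) : Decidable (Pre_solution land) := by
  unfold Pre_solution; infer_instance

def pvWitness_solution : List (List Int) := [[1, 0], [0, 1]]

def Spec_solution (land : List (List Int)) (out : Int) : Prop := out = solution_alt land
instance (land : List (List Int)) (out : Int) : Decidable (Spec_solution land out) := by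
  unfold Spec_solution; infer_instance

-- ===== CLAIM (what is proved, stated in full; the proofs are below) =====
def Claim_equal_solution : Prop :=
  ∀ (land : List (List Int)), Dom_solution land → Pre_solution land →
    Spec_solution land (solution land)

-- ===== LEMMAS AND PROOFS =====

-- Proof-layer abstractions ---------------------------------------------------

def InR (n m : Int) (c : Int × Int) : Prop :=
  0 ≤ c.1 ∧ c.1 < n ∧ 0 ≤ c.2 ∧ c.2 < m

def Oil (land : List (List Int)) (n m : Int) (c : Int × Int) : Prop :=
  InR n m c ∧ landGet land c.1 c.2 = 1

def Adj (c d : Int × Int) : Prop := (d.1 - c.1, d.2 - c.2) ∈ direction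

inductive Reach (land : List (List Int)) (n m : Int) (V : Int × Int → Prop) :
    (Int × Int) → (Int × Int) → Prop
  | refl (w : Int × Int) : Oil land n m w → ¬ V w → Reach land n m V w w
  | step (w c d : Int × Int) : Reach land n m V w c → Adj c d → Oil land n m d →
      ¬ V d → Reach land n m V w d

def ReachW (land : List (List Int)) (n m : Int) (V : Int × Int → Prop)
    (q : List (Int × Int)) (x : Int × Int) : Prop :=
  ∃ w ∈ q, Reach land n m V w x

def vmem (v : List (List Bool)) (c : Int × Int) : Prop := vget v c.1 c.2 = true

def Shape (v : List (List Bool)) (n m : Int) : Prop :=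
  v.length = n.toNat ∧ ∀ r ∈ v, r.length = m.toNat

def Ucount (v : List (List Bool)) : Nat := (v.map (fun r => r.count false)).sum

def markAll (v : List (List Bool)) (M : List (Int × Int)) : List (List Bool) :=
  M.foldl (fun v c => vset v c.1 c.2) v

theorem adj_symm {c d : Int × Int} (h : Adj c d) : Adj d c := by
  rcases c with ⟨a, b⟩; rcases d with ⟨e, f⟩
  simp [Adj, direction, Prod.ext_iff] at h ⊢
  omega

theorem mem_dirGen (c x : Int × Int) (P : Int → Int → Bool) :
    (x ∈ ([(0, 1), (1, 0), (-1, 0), (0, -1)] : List (Int × Int)).filterMap (fun d =>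
      if P (c.1 + d.1) (c.2 + d.2) then some (c.1 + d.1, c.2 + d.2) else none)) ↔
    (Adj c x ∧ P x.1 x.2 = true) := by
  rw [List.mem_filterMap]
  rcases c with ⟨a, b⟩; rcases x with ⟨e, f⟩
  constructor
  · rintro ⟨⟨d1, d2⟩, hd, hf⟩
    split_ifs at hf with hP
    · simp only [Option.some.injEq, Prod.ext_iff] at hf
      obtain ⟨h1, h2⟩ := hf
      simp only at hd h1 h2 hP
      simp only [Adj, direction, List.mem_cons, List.not_mem_nil, or_false,
        Prod.ext_iff] at hd ⊢
      constructor
      · omega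
      · subst h1; subst h2; exact hP
  · rintro ⟨hadj, hP⟩
    simp only [Adj, direction, List.mem_cons, List.not_mem_nil, or_false,
      Prod.ext_iff] at hadj
    refine ⟨(e - a, f - b), ?_, ?_⟩
    · simp only [List.mem_cons, List.not_mem_nil, or_false, Prod.ext_iff]
      omega
    · have h1 : a + (e - a, f - b).1 = e := by simp
      have h2 : b + (e - a, f - b).2 = f := by simp
      rw [h1, h2, if_pos hP]

theorem reach_start {land n m V w x} (h : Reach land n m V w x) :
    Oil land n m w ∧ ¬ V w := by
  induction h with
  | refl hw hv => exact ⟨hw, hv⟩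
  | step c d _ _ _ _ ih => exact ih

theorem reach_end {land n m V w x} (h : Reach land n m V w x) :
    Oil land n m x ∧ ¬ V x := by
  cases h with
  | refl hw hv => exact ⟨hw, hv⟩
  | step c d _ _ ho hv => exact ⟨ho, hv⟩

theorem reach_mono {land n m} {V V' : (Int × Int) → Prop}
    (h : ∀ y, V y → V' y) {w x} (hr : Reach land n m V' w x) :
    Reach land n m V w x := by
  induction hr with
  | refl hw hv => exact .refl _ hw (fun hc => hv (h _ hc))
  | step c d _ ha ho hv ih => exact .step _ c d ih ha ho (fun hc => hv (h _ hc))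

theorem reach_congr {land n m} {V V' : (Int × Int) → Prop}
    (h : ∀ y, Oil land n m y → (V y ↔ V' y)) {w x} (hr : Reach land n m V w x) :
    Reach land n m V' w x := by
  induction hr with
  | refl hw hv => exact .refl _ hw (fun hc => hv ((h _ hw).2 hc))
  | step c d _ ha ho hv ih => exact .step _ c d ih ha ho (fun hc => hv ((h _ ho).2 hc))

theorem reach_trans {land n m V} {a b x : Int × Int}
    (h1 : Reach land n m V a b) (h2 : Reach land n m V b x) :
    Reach land n m V a x := by
  induction h2 with
  | refl _ _ => exact h1
  | step c d _ ha ho hv ih => exact .step a c d ih ha ho hv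

theorem reach_split {land n m} {V : (Int × Int) → Prop} {c : Int × Int}
    {N : List (Int × Int)}
    (hN : ∀ y, y ∈ N ↔ (Adj c y ∧ Oil land n m y ∧ ¬ (y = c ∨ V y)))
    {w x} (h : Reach land n m V w x) :
    x = c ∨ (w ≠ c ∧ Reach land n m (fun y => y = c ∨ V y) w x) ∨
      ∃ e ∈ N, Reach land n m (fun y => y = c ∨ V y) e x := by
  induction h with
  | refl hw hv =>
    by_cases hwc : w = c
    · exact Or.inl hwc
    · exact Or.inr (Or.inl ⟨hwc, .refl w hw (by simp [hwc, hv])⟩)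
  | step a d hr hadj hod hvd ih =>
    by_cases hdc : d = c
    · exact Or.inl hdc
    · rcases ih with hac | ⟨hne, hr'⟩ | ⟨e, he, hr'⟩
      · refine Or.inr (Or.inr ⟨d, (hN d).2 ⟨hac ▸ hadj, hod, by simp [hdc, hvd]⟩,
          .refl d hod (by simp [hdc, hvd])⟩)
      · exact Or.inr (Or.inl ⟨hne, .step w a d hr' hadj hod (by simp [hdc, hvd])⟩)
      · exact Or.inr (Or.inr ⟨e, he, .step e a d hr' hadj hod (by simp [hdc, hvd])⟩)

theorem reach_exchange {land n m} {V : (Int × Int) → Prop} {c : Int × Int}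
    {q N : List (Int × Int)}
    (hc : Oil land n m c) (hcV : ¬ V c)
    (hN : ∀ y, y ∈ N ↔ (Adj c y ∧ Oil land n m y ∧ ¬ (y = c ∨ V y))) (x : Int × Int) :
    ReachW land n m V (c :: q) x ↔
      (x = c ∨ ReachW land n m (fun y => y = c ∨ V y) (q ++ N) x) := by
  constructor
  · rintro ⟨w, hw, hr⟩
    rcases reach_split hN hr with hx | ⟨hne, hr'⟩ | ⟨e, he, hr'⟩
    · exact Or.inl hx
    · rcases List.mem_cons.1 hw with rfl | hwq
      · exact absurd rfl hne
      · exact Or.inr ⟨w, List.mem_append_left _ hwq, hr'⟩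
    · exact Or.inr ⟨e, List.mem_append_right _ he, hr'⟩
  · rintro (rfl | ⟨w, hw, hr⟩)
    · exact ⟨x, List.mem_cons_self .., .refl x hc hcV⟩
    · have hr0 : Reach land n m V w x := reach_mono (fun y hy => Or.inr hy) hr
      rcases List.mem_append.1 hw with hwq | hwN
      · exact ⟨w, List.mem_cons_of_mem _ hwq, hr0⟩
      · obtain ⟨hadj, how, hnv⟩ := (hN w).1 hwN
        have hvw : ¬ V w := fun hv => hnv (Or.inr hv)
        exact ⟨c, List.mem_cons_self ..,
          reach_trans (.step c c w (.refl c hc hcV) hadj how hvw) hr0⟩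


-- Visited-matrix lemmas -------------------------------------------------------

theorem shape_vset {v : List (List Bool)} {n m : Int} (hs : Shape v n m)
    {i j : Int} (hin : InR n m (i, j)) : Shape (vset v i j) n m := by
  obtain ⟨h1, h2⟩ := hs
  refine ⟨by simpa [vset] using h1, ?_⟩
  intro r hr
  rcases List.mem_or_eq_of_mem_set hr with h | rfl
  · exact h2 _ h
  · obtain ⟨hi1, hi2, _, _⟩ := hin
    have hlen : i.toNat < v.length := by rw [h1]; omega
    have h3 : PySem.List.pyGet? v i = some v[i.toNat] := by
      rw [PySem.List.pyGet?_of_nonneg _ hi1, List.getElem?_eq_getElem hlen]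
    simp [h3, h2 _ (List.getElem_mem _)]

theorem vget_nonneg_eq (v : List (List Bool)) {i j : Int} (hi : 0 ≤ i) (hj : 0 ≤ j) :
    vget v i j = ((v[i.toNat]?.getD [])[j.toNat]?).getD false := by
  rw [vget, PySem.List.pyGet?_of_nonneg _ hi, PySem.List.pyGet?_of_nonneg _ hj]

theorem vget_vset {v : List (List Bool)} {n m : Int} (hs : Shape v n m)
    {c : Int × Int} (hc : InR n m c) {x : Int × Int} (hx : InR n m x) :
    vget (vset v c.1 c.2) x.1 x.2 = (if x = c then true else vget v x.1 x.2) := by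
  obtain ⟨hv1, hv2⟩ := hs
  obtain ⟨hc1, hc2, hc3, hc4⟩ := hc
  obtain ⟨hx1, hx2, hx3, hx4⟩ := hx
  have hlen : c.1.toNat < v.length := by rw [hv1]; omega
  have hrow : PySem.List.pyGet? v c.1 = some v[c.1.toNat] := by
    rw [PySem.List.pyGet?_of_nonneg _ hc1, List.getElem?_eq_getElem hlen]
  have hrlen : v[c.1.toNat].length = m.toNat := hv2 _ (List.getElem_mem _)
  rw [vget_nonneg_eq _ hx1 hx3, vget_nonneg_eq _ hx1 hx3]
  unfold vset
  rw [hrow]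
  simp only [Option.getD_some]
  by_cases h1 : x.1.toNat = c.1.toNat
  · rw [h1, List.getElem?_set, if_pos rfl, if_pos hlen]
    simp only [Option.getD_some]
    by_cases h2 : x.2.toNat = c.2.toNat
    · have hx_eq : x = c := Prod.ext_iff.2 ⟨by omega, by omega⟩
      rw [h2, List.getElem?_set, if_pos rfl, if_pos (by rw [hrlen]; omega)]
      simp [hx_eq]
    · have hx_ne : x ≠ c := fun h => h2 (by rw [h])
      rw [List.getElem?_set, if_neg (fun hh => h2 hh.symm), if_neg hx_ne,
        List.getElem?_eq_getElem hlen]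
      simp
  · have hx_ne : x ≠ c := fun h => h1 (by rw [h])
    rw [List.getElem?_set, if_neg (fun hh => h1 hh.symm), if_neg hx_ne]

theorem sum_set_nat : ∀ (l : List Nat) (k : Nat) (x : Nat) (h : k < l.length),
    (l.set k x).sum + l[k]'h = l.sum + x := by
  intro l
  induction l with
  | nil => intro k x h; simp at h
  | cons a t ih =>
    intro k x h
    cases k with
    | zero => simp [List.set]; omega
    | succ k =>
      simp only [List.set, List.sum_cons, List.getElem_cons_succ]
      have := ih k x (by simpa using h)
      omega

theorem count_set_false : ∀ (l : List Bool) (k : Nat) (h : k < l.length),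
    l[k]'h = false → (l.set k true).count false + 1 = l.count false := by
  intro l
  induction l with
  | nil => intro k h; simp at h
  | cons a t ih =>
    intro k h hf
    cases k with
    | zero =>
      simp only [List.getElem_cons_zero] at hf
      subst hf
      simp [List.set]
    | succ k =>
      simp only [List.set, List.count_cons]
      have := ih k (by simpa using h) (by simpa using hf)
      by_cases ha : a = false <;> simp [ha] <;> omega


theorem ucount_le {v : List (List Bool)} {n m : Int} (hs : Shape v n m) :
    Ucount v ≤ n.toNat * m.toNat := by
  obtain ⟨h1, h2⟩ := hs
  have hb : ∀ x ∈ v.map (fun r => r.count false), x ≤ m.toNat := by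
    intro x hx
    obtain ⟨r, hr, rfl⟩ := List.mem_map.1 hx
    exact le_trans (List.count_le_length) (le_of_eq (h2 _ hr))
  calc Ucount v ≤ (v.map (fun r => r.count false)).length * m.toNat := by
        simpa using List.sum_le_card_nsmul _ _ hb
    _ = n.toNat * m.toNat := by simp [h1]

theorem ucount_vset {v : List (List Bool)} {n m : Int} (hs : Shape v n m)
    {c : Int × Int} (hc : InR n m c) (hf : vget v c.1 c.2 = false) :
    Ucount (vset v c.1 c.2) + 1 = Ucount v := by
  obtain ⟨hv1, hv2⟩ := hs
  obtain ⟨hc1, hc2, hc3, hc4⟩ := hc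
  have hlen : c.1.toNat < v.length := by rw [hv1]; omega
  have hrow : PySem.List.pyGet? v c.1 = some v[c.1.toNat] := by
    rw [PySem.List.pyGet?_of_nonneg _ hc1, List.getElem?_eq_getElem hlen]
  have hrlen : c.2.toNat < v[c.1.toNat].length := by
    rw [hv2 _ (List.getElem_mem _)]; omega
  have hcell : (v[c.1.toNat])[c.2.toNat]'hrlen = false := by
    rw [vget_nonneg_eq _ hc1 hc3, List.getElem?_eq_getElem hlen] at hf
    simpa [List.getElem?_eq_getElem hrlen] using hf
  have hcount := count_set_false _ _ hrlen hcell
  have hmap : (vset v c.1 c.2).map (fun r => r.count false) =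
      (v.map (fun r => r.count false)).set c.1.toNat
        ((v[c.1.toNat].set c.2.toNat true).count false) := by
    rw [vset, hrow]
    simp [List.map_set]
  have hsum := sum_set_nat (v.map (fun r => r.count false)) c.1.toNat
      ((v[c.1.toNat].set c.2.toNat true).count false) (by simpa using hlen)
  have hget : (v.map (fun r => r.count false))[c.1.toNat]'(by simpa using hlen) =
      v[c.1.toNat].count false := by simp
  rw [Ucount, hmap]
  rw [Ucount]
  omega

theorem shape_markAll {v : List (List Bool)} {n m : Int} {M : List (Int × Int)}
    (hs : Shape v n m) (hM : ∀ c ∈ M, InR n m c) : Shape (markAll v M) n m := by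
  induction M generalizing v with
  | nil => exact hs
  | cons c M ih =>
    have hc : InR n m c := hM c (List.mem_cons_self ..)
    exact ih (shape_vset hs (by exact hc)) (fun d hd => hM d (List.mem_cons_of_mem _ hd))

theorem vmem_markAll {v : List (List Bool)} {n m : Int} {M : List (Int × Int)}
    (hs : Shape v n m) (hM : ∀ c ∈ M, InR n m c) {x : Int × Int} (hx : InR n m x) :
    (vmem (markAll v M) x ↔ (vmem v x ∨ x ∈ M)) := by
  induction M generalizing v with
  | nil => simp [markAll]
  | cons c M ih =>
    have hc : InR n m c := hM c (List.mem_cons_self ..)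
    have step : markAll v (c :: M) = markAll (vset v c.1 c.2) M := rfl
    rw [step, ih (shape_vset hs hc) (fun d hd => hM d (List.mem_cons_of_mem _ hd))]
    have hvv : vmem (vset v c.1 c.2) x ↔ (x = c ∨ vmem v x) := by
      rw [vmem, vget_vset hs hc hx]
      by_cases h : x = c <;> simp [h, vmem]
    rw [hvv]
    simp only [List.mem_cons]
    tauto


-- the neighbour list generated when popping c (visited already updated at c)
theorem mem_nbrs (land : List (List Int)) {n m : Int} {v : List (List Bool)}
    (hs : Shape v n m) {c : Int × Int} (hc : InR n m c) (y : Int × Int) :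
    (y ∈ direction.filterMap (fun d =>
        if isValid (c.1 + d.1) (c.2 + d.2) n m &&
           !(vget (vset v c.1 c.2) (c.1 + d.1) (c.2 + d.2)) &&
           (landGet land (c.1 + d.1) (c.2 + d.2) == 1)
        then some (c.1 + d.1, c.2 + d.2) else none)) ↔
    (Adj c y ∧ Oil land n m y ∧ ¬ (y = c ∨ vmem v y)) := by
  have h := mem_dirGen c y (fun ni nj => isValid ni nj n m &&
      !(vget (vset v c.1 c.2) ni nj) && (landGet land ni nj == 1))
  rw [show ([(0,1),(1,0),(-1,0),(0,-1)] : List (Int × Int)) = direction from rfl] at h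
  rw [h]
  constructor
  · rintro ⟨hadj, hP⟩
    simp only [Bool.and_eq_true, Bool.not_eq_true', beq_iff_eq] at hP
    obtain ⟨⟨hvalid, hnv⟩, hland⟩ := hP
    have hInRy : InR n m y := by
      have h2 := (by simpa [isValid, decide_eq_true_iff] using hvalid :
        (0 ≤ y.1 ∧ y.1 < n) ∧ (0 ≤ y.2 ∧ y.2 < m))
      exact ⟨h2.1.1, h2.1.2, h2.2.1, h2.2.2⟩
    have hOy : Oil land n m y := ⟨hInRy, hland⟩
    rw [vget_vset hs hc hInRy] at hnv
    refine ⟨hadj, hOy, ?_⟩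
    rintro (rfl | hvy)
    · simp at hnv
    · rw [if_neg ?_] at hnv
      · exact absurd hnv (by simp [vmem] at hvy ⊢; exact hvy)
      · rintro rfl; simp at hnv
  · rintro ⟨hadj, ⟨hInRy, hland⟩, hnot⟩
    refine ⟨hadj, ?_⟩
    simp only [Bool.and_eq_true, Bool.not_eq_true', beq_iff_eq]
    have hvalid : isValid y.1 y.2 n m = true := by
      simp only [isValid, Bool.and_eq_true, decide_eq_true_iff]
      exact ⟨⟨hInRy.1, hInRy.2.1⟩, hInRy.2.2.1, hInRy.2.2.2⟩
    refine ⟨⟨hvalid, ?_⟩, hland⟩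
    rw [vget_vset hs hc hInRy, if_neg (fun h => hnot (Or.inl h))]
    have : ¬ vmem v y := fun h => hnot (Or.inr h)
    simpa [vmem] using this

theorem bfsLoop_spec (land : List (List Int)) (n m : Int) :
    ∀ (fuel : Nat) (v : List (List Bool)) (q : List (Int × Int)) (count mn mx : Int),
    Shape v n m → (∀ c ∈ q, Oil land n m c) →
    5 * Ucount v + q.length ≤ fuel →
    ∃ M : List (Int × Int), M.Nodup ∧ (∀ c ∈ M, Oil land n m c) ∧
      (∀ x, x ∈ M ↔ ReachW land n m (vmem v) q x) ∧
      bfsLoop land n m fuel v q count mn mx =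
        (markAll v M, count + (M.length : Int),
         (M.map Prod.snd).foldl min mn, (M.map Prod.snd).foldl max mx) := by
  intro fuel
  induction fuel with
  | zero =>
    intro v q count mn mx hs hq hf
    have hq0 : q = [] := List.length_eq_zero_iff.1 (by omega)
    subst hq0
    exact ⟨[], List.nodup_nil, by simp, by simp [ReachW], by simp [bfsLoop, markAll]⟩
  | succ fuel ih =>
    intro v q count mn mx hs hq hf
    cases q with
    | nil =>
      exact ⟨[], List.nodup_nil, by simp, by simp [ReachW], by simp [bfsLoop, markAll]⟩
    | cons c q' =>
      by_cases hv : vget v c.1 c.2 = true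
      · -- pop a cell already visited: skip
        obtain ⟨M, hnd, hoil, hmem, heq⟩ := ih v q' count mn mx hs
          (fun d hd => hq d (List.mem_cons_of_mem _ hd))
          (by simp only [List.length_cons] at hf; omega)
        refine ⟨M, hnd, hoil, ?_, ?_⟩
        · intro x
          rw [hmem x]
          constructor
          · rintro ⟨w, hw, hr⟩; exact ⟨w, List.mem_cons_of_mem _ hw, hr⟩
          · rintro ⟨w, hw, hr⟩
            rcases List.mem_cons.1 hw with rfl | hw'
            · exact absurd hv (reach_start hr).2
            · exact ⟨w, hw', hr⟩
        · rw [show bfsLoop land n m (fuel + 1) v (c :: q') count mn mx =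
              bfsLoop land n m fuel v q' count mn mx from by simp [bfsLoop, hv]]
          exact heq
      · -- pop a fresh cell: mark it and enqueue its neighbours
        have hvf : vget v c.1 c.2 = false := by simpa using hv
        have hoilc : Oil land n m c := hq c (List.mem_cons_self ..)
        have hInc : InR n m c := hoilc.1
        have hs' : Shape (vset v c.1 c.2) n m := shape_vset hs (by
          rcases c with ⟨c1, c2⟩; exact hInc)
        have hN := fun y => mem_nbrs land hs hInc y
        obtain ⟨M', hnd', hoil', hmem', heq'⟩ := ih (vset v c.1 c.2)
          (q' ++ direction.filterMap (fun d =>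
            if isValid (c.1 + d.1) (c.2 + d.2) n m &&
               !(vget (vset v c.1 c.2) (c.1 + d.1) (c.2 + d.2)) &&
               (landGet land (c.1 + d.1) (c.2 + d.2) == 1)
            then some (c.1 + d.1, c.2 + d.2) else none))
          (count + 1) (min mn c.2) (max mx c.2) hs'
          (by
            intro d hd
            rcases List.mem_append.1 hd with h | h
            · exact hq d (List.mem_cons_of_mem _ h)
            · exact ((hN d).1 h).2.1)
          (by
            have h1 := ucount_vset hs hInc hvf
            have h2 : (direction.filterMap (fun d =>
                if isValid (c.1 + d.1) (c.2 + d.2) n m &&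
                   !(vget (vset v c.1 c.2) (c.1 + d.1) (c.2 + d.2)) &&
                   (landGet land (c.1 + d.1) (c.2 + d.2) == 1)
                then some (c.1 + d.1, c.2 + d.2) else none)).length ≤ 4 := by
              refine le_trans (List.length_filterMap_le _ _) (by simp [direction])
            simp only [List.length_append, List.length_cons] at hf ⊢
            omega)
        have hvmem' : ∀ y, Oil land n m y →
            (vmem (vset v c.1 c.2) y ↔ (y = c ∨ vmem v y)) := by
          intro y hy
          rw [vmem, vget_vset hs hInc hy.1]
          by_cases h : y = c <;> simp [h, vmem]
        refine ⟨c :: M', ?_, ?_, ?_, ?_⟩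
        · refine List.nodup_cons.2 ⟨?_, hnd'⟩
          intro hcm
          obtain ⟨w, _, hr⟩ := (hmem' c).1 hcm
          refine (reach_end hr).2 ?_
          rw [vmem, vget_vset hs hInc hInc, if_pos rfl]
        · intro d hd
          rcases List.mem_cons.1 hd with rfl | h
          · exact hoilc
          · exact hoil' d h
        · intro x
          rw [reach_exchange hoilc (by simpa [vmem] using hvf) hN x]
          simp only [List.mem_cons]
          rw [hmem' x]
          constructor
          · rintro (rfl | ⟨w, hw, hr⟩)
            · exact Or.inl rfl
            · exact Or.inr ⟨w, hw, reach_congr (fun y hy => (hvmem' y hy)) hr⟩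
          · rintro (rfl | ⟨w, hw, hr⟩)
            · exact Or.inl rfl
            · exact Or.inr ⟨w, hw, reach_congr (fun y hy => (hvmem' y hy).symm) hr⟩
        · rw [show bfsLoop land n m (fuel + 1) v (c :: q') count mn mx =
              bfsLoop land n m fuel (vset v c.1 c.2)
                (q' ++ direction.filterMap (fun d =>
                  if isValid (c.1 + d.1) (c.2 + d.2) n m &&
                     !(vget (vset v c.1 c.2) (c.1 + d.1) (c.2 + d.2)) &&
                     (landGet land (c.1 + d.1) (c.2 + d.2) == 1)
                  then some (c.1 + d.1, c.2 + d.2) else none))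
                (count + 1) (min mn c.2) (max mx c.2) from by simp [bfsLoop, hvf]]
          rw [heq']
          simp only [Prod.mk.injEq, List.map_cons, List.foldl_cons, List.length_cons]
          exact ⟨rfl, by push_cast; ring, trivial⟩


-- Saturation (port B) lemmas --------------------------------------------------

theorem mem_growB (land : List (List Int)) {n m : Int} (comp : PySem.Set (Int × Int))
    (y : Int × Int) :
    y ∈ growB land n m comp ↔
      ((∃ c ∈ comp, Adj c y) ∧ Oil land n m y ∧ y ∉ comp) := by
  rw [growB, PySem.Set.mem_diff, PySem.Set.mem_ofList, List.mem_flatMap]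
  constructor
  · rintro ⟨⟨c, hc, hy⟩, hnc⟩
    obtain ⟨hadj, hP⟩ := (mem_dirGen c y (fun ni nj => decide (0 ≤ ni ∧ ni < n) &&
      decide (0 ≤ nj ∧ nj < m) && (landGet land ni nj == 1))).1 hy
    simp only [Bool.and_eq_true, beq_iff_eq, decide_eq_true_iff] at hP
    exact ⟨⟨c, hc, hadj⟩, ⟨⟨hP.1.1.1, hP.1.1.2, hP.1.2.1, hP.1.2.2⟩, hP.2⟩, hnc⟩
  · rintro ⟨⟨c, hc, hadj⟩, ⟨hin, hland⟩, hnc⟩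
    refine ⟨⟨c, hc, (mem_dirGen c y (fun ni nj => decide (0 ≤ ni ∧ ni < n) &&
      decide (0 ≤ nj ∧ nj < m) && (landGet land ni nj == 1))).2 ⟨hadj, ?_⟩⟩, hnc⟩
    simp only [Bool.and_eq_true, beq_iff_eq, decide_eq_true_iff]
    exact ⟨⟨⟨hin.1, hin.2.1⟩, hin.2.2.1, hin.2.2.2⟩, hland⟩

theorem nodup_growB (land : List (List Int)) {n m : Int} (comp : PySem.Set (Int × Int)) :
    (growB land n m comp).Nodup :=
  PySem.Set.nodup_diff _ _ (PySem.Set.nodup_ofList _)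

theorem nodup_inr_length_le {n m : Int} (l : List (Int × Int)) (hnd : l.Nodup)
    (h : ∀ c ∈ l, InR n m c) : l.length ≤ n.toNat * m.toNat := by
  by_cases hm : m.toNat = 0
  · cases l with
    | nil => simp
    | cons a t =>
      have := h a (List.mem_cons_self ..)
      exfalso
      obtain ⟨_, _, h3, h4⟩ := this
      omega
  have hmpos : 0 < m.toNat := Nat.pos_of_ne_zero hm
  set f : Int × Int → Nat := fun c => c.1.toNat * m.toNat + c.2.toNat with hf
  have hinj : ∀ c ∈ l, ∀ d ∈ l, f c = f d → c = d := by
    intro c hc d hd hfe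
    obtain ⟨hc1, hc2, hc3, hc4⟩ := h c hc
    obtain ⟨hd1, hd2, hd3, hd4⟩ := h d hd
    have hcm : c.2.toNat < m.toNat := by omega
    have hdm : d.2.toNat < m.toNat := by omega
    have h1 : c.1.toNat = d.1.toNat := by
      have e1 : f c / m.toNat = c.1.toNat := by
        rw [hf]
        simp only []
        rw [Nat.mul_comm, Nat.mul_add_div hmpos, Nat.div_eq_of_lt hcm, Nat.add_zero]
      have e2 : f d / m.toNat = d.1.toNat := by
        rw [hf]
        simp only []
        rw [Nat.mul_comm, Nat.mul_add_div hmpos, Nat.div_eq_of_lt hdm, Nat.add_zero]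
      rw [← e1, ← e2, hfe]
    have h2 : c.2.toNat = d.2.toNat := by
      simp only [hf] at hfe
      rw [h1] at hfe
      omega
    exact Prod.ext_iff.2 ⟨by omega, by omega⟩
  have hmapnd : (l.map f).Nodup := List.Nodup.map_on hinj hnd
  have hsub : ∀ x ∈ l.map f, x ∈ List.range (n.toNat * m.toNat) := by
    intro x hx
    obtain ⟨c, hc, rfl⟩ := List.mem_map.1 hx
    obtain ⟨hc1, hc2, hc3, hc4⟩ := h c hc
    rw [List.mem_range]
    calc f c < c.1.toNat * m.toNat + m.toNat := by simp [hf]; omega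
      _ = (c.1.toNat + 1) * m.toNat := by ring
      _ ≤ n.toNat * m.toNat := Nat.mul_le_mul_right _ (by omega)
  calc l.length = (l.map f).length := by simp
    _ = (l.map f).toFinset.card := (List.toFinset_card_of_nodup hmapnd).symm
    _ ≤ (List.range (n.toNat * m.toNat)).toFinset.card := by
        apply Finset.card_le_card
        intro x hx
        rw [List.mem_toFinset] at hx ⊢
        exact hsub x hx
    _ ≤ (List.range (n.toNat * m.toNat)).length := List.toFinset_card_le _
    _ = n.toNat * m.toNat := by simp

theorem saturate_spec (land : List (List Int)) (n m : Int) :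
    ∀ (fuel : Nat) (comp : PySem.Set (Int × Int)), comp.Nodup →
    (∀ c ∈ comp, Oil land n m c) →
    n.toNat * m.toNat + 1 ≤ fuel + comp.length →
    (saturate land n m fuel comp).Nodup ∧
    (∀ c ∈ comp, c ∈ saturate land n m fuel comp) ∧
    (∀ c ∈ saturate land n m fuel comp, Oil land n m c) ∧
    (∀ c ∈ saturate land n m fuel comp, ∀ d, Adj c d → Oil land n m d →
       d ∈ saturate land n m fuel comp) ∧
    (∀ x ∈ saturate land n m fuel comp, ∃ w ∈ comp,
       Reach land n m (fun _ => False) w x) := by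
  intro fuel
  induction fuel with
  | zero =>
    intro comp hnd hoil hfuel
    exfalso
    have := nodup_inr_length_le comp hnd (fun c hc => (hoil c hc).1)
    omega
  | succ fuel ih =>
    intro comp hnd hoil hfuel
    by_cases hg : (growB land n m comp).isEmpty = true
    · have hstep : saturate land n m (fuel + 1) comp = comp := by
        simp [saturate, hg]
      rw [hstep]
      have hgnil : growB land n m comp = [] := List.isEmpty_iff.1 hg
      refine ⟨hnd, fun c hc => hc, hoil, ?_, ?_⟩
      · intro c hc d hadj hod
        by_cases hdc : d ∈ comp
        · exact hdc
        · exfalso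
          have : d ∈ growB land n m comp :=
            (mem_growB land comp d).2 ⟨⟨c, hc, hadj⟩, hod, hdc⟩
          rw [hgnil] at this
          simp at this
      · intro x hx
        exact ⟨x, hx, .refl x (hoil x hx) (fun h => h)⟩
    · have hgne : growB land n m comp ≠ [] := fun h => by simp [h] at hg
      have hdisj : ∀ x ∈ growB land n m comp, x ∉ comp :=
        fun x hx => ((mem_growB land comp x).1 hx).2.2
      have hunion : PySem.Set.union comp (growB land n m comp) =
          comp ++ growB land n m comp := by
        rw [show PySem.Set.union comp (growB land n m comp) =
            PySem.Set.update comp (growB land n m comp) from rfl]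
        exact PySem.Set.update_eq_append_of_disjoint _ _ (nodup_growB land comp) hdisj
      have hstep : saturate land n m (fuel + 1) comp =
          saturate land n m fuel (comp ++ growB land n m comp) := by
        rw [saturate]
        rw [if_neg (by simpa using hg), hunion]
      rw [hstep]
      have hnd' : (comp ++ growB land n m comp).Nodup :=
        List.Nodup.append hnd (nodup_growB land comp)
          (fun a ha hb => hdisj a hb ha)
      have hoil' : ∀ c ∈ comp ++ growB land n m comp, Oil land n m c := by
        intro c hc
        rcases List.mem_append.1 hc with h | h
        · exact hoil c h
        · exact ((mem_growB land comp c).1 h).2.1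
      have hlen : comp.length + 1 ≤ (comp ++ growB land n m comp).length := by
        simp only [List.length_append]
        have : growB land n m comp ≠ [] := hgne
        have := List.length_pos_iff.2 this
        omega
      obtain ⟨s1, s2, s3, s4, s5⟩ := ih (comp ++ growB land n m comp) hnd' hoil'
        (by omega)
      refine ⟨s1, ?_, s3, s4, ?_⟩
      · intro c hc
        exact s2 c (List.mem_append_left _ hc)
      · intro x hx
        obtain ⟨w, hw, hr⟩ := s5 x hx
        rcases List.mem_append.1 hw with h | h
        · exact ⟨w, h, hr⟩
        · obtain ⟨⟨c, hc, hadj⟩, how, _⟩ := (mem_growB land comp w).1 h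
          exact ⟨c, hc, reach_trans
            (.step c c w (.refl c (hoil c hc) (fun h => h)) hadj how (fun h => h)) hr⟩

theorem reach_subset_closed {land : List (List Int)} {n m : Int}
    {S : List (Int × Int)}
    (hcl : ∀ c ∈ S, ∀ d, Adj c d → Oil land n m d → d ∈ S) {s x : Int × Int}
    (hs : s ∈ S) (h : Reach land n m (fun _ => False) s x) : x ∈ S := by
  induction h with
  | refl _ _ => exact hs
  | step c d hr hadj hod _ ih => exact hcl c ih d hadj hod


theorem reach_false_to_avoid {land : List (List Int)} {n m : Int}
    {B : List (Int × Int)}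
    (hcl : ∀ c ∈ B, ∀ d, Adj c d → Oil land n m d → d ∈ B)
    {s x : Int × Int} (hs : s ∉ B)
    (h : Reach land n m (fun _ => False) s x) :
    Reach land n m (fun c => c ∈ B) s x := by
  induction h with
  | refl hw _ => exact .refl _ hw hs
  | step c d hr hadj hod _ ih =>
    have hcB : c ∉ B := (reach_end ih).2
    have hdB : d ∉ B := fun hd => hcB (hcl d hd c (adj_symm hadj) (reach_end ih).1)
    exact .step _ c d ih hadj hod hdB

-- Outer-loop lockstep ---------------------------------------------------------

def OuterInv (land : List (List Int)) (n m : Int)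
    (a : List (List Bool) × List Int) (b : PySem.Set (Int × Int) × List Int) : Prop :=
  Shape a.1 n m ∧ a.2 = b.2 ∧ b.1.Nodup ∧
  (∀ c, InR n m c → (vmem a.1 c ↔ c ∈ b.1)) ∧
  (∀ c ∈ b.1, Oil land n m c) ∧
  (∀ c ∈ b.1, ∀ d, Adj c d → Oil land n m d → d ∈ b.1)

theorem foldl_rel {α σ τ : Type} (R : σ → τ → Prop) (f : σ → α → σ) (g : τ → α → τ) :
    ∀ (l : List α) (sA : σ) (sB : τ), R sA sB →
    (∀ x ∈ l, ∀ a b, R a b → R (f a x) (g b x)) →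
    R (l.foldl f sA) (l.foldl g sB) := by
  intro l
  induction l with
  | nil => intro sA sB h _; exact h
  | cons x t ih =>
    intro sA sB h hstep
    exact ih _ _ (hstep x (List.mem_cons_self ..) sA sB h)
      (fun y hy => hstep y (List.mem_cons_of_mem _ hy))

theorem vget_replicate (nn mm : Nat) (i j : Int) :
    vget (List.replicate nn (List.replicate mm false)) i j = false := by
  unfold vget
  rcases h : PySem.List.pyGet? (List.replicate nn (List.replicate mm false)) i with _ | row
  · simp [PySem.List.pyGet?]
  · have hrow : row = List.replicate mm false :=
      List.eq_of_mem_replicate (PySem.List.mem_of_pyGet?_eq_some _ h)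
    subst hrow
    simp only [Option.getD_some]
    rcases h2 : PySem.List.pyGet? (List.replicate mm false) j with _ | bb
    · rfl
    · simpa using List.eq_of_mem_replicate (PySem.List.mem_of_pyGet?_eq_some _ h2)

theorem cell_step (land : List (List Int)) {n m : Int} {i j : Int}
    (hi : 0 ≤ i) (hi2 : i < n) (hj : 0 ≤ j) (hj2 : j < m)
    (a : List (List Bool) × List Int) (b : PySem.Set (Int × Int) × List Int)
    (hR : OuterInv land n m a b) :
    OuterInv land n m
      (if landGet land i j == 1 && !(vget a.1 i j) then
        ((bfsLoop land n m (5 * (n.toNat * m.toNat) + 1) a.1 [(i, j)] 0 j j).1,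
         bumpRange a.2
           (bfsLoop land n m (5 * (n.toNat * m.toNat) + 1) a.1 [(i, j)] 0 j j).2.2.1
           (bfsLoop land n m (5 * (n.toNat * m.toNat) + 1) a.1 [(i, j)] 0 j j).2.2.2
           (bfsLoop land n m (5 * (n.toNat * m.toNat) + 1) a.1 [(i, j)] 0 j j).2.1)
      else a)
      (if landGet land i j == 1 && !(PySem.Set.contains b.1 (i, j)) then
        (PySem.Set.union b.1
           (saturate land n m (n.toNat * m.toNat + 1) (PySem.Set.ofList [(i, j)])),
         bumpRange b.2
           ((PySem.List.min? ((saturate land n m (n.toNat * m.toNat + 1)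
               (PySem.Set.ofList [(i, j)])).map Prod.snd) (fun x => x)).getD 0)
           ((PySem.List.max? ((saturate land n m (n.toNat * m.toNat + 1)
               (PySem.Set.ofList [(i, j)])).map Prod.snd) (fun x => x)).getD 0)
           (((saturate land n m (n.toNat * m.toNat + 1)
               (PySem.Set.ofList [(i, j)])).length : Int)))
      else b) := by
  obtain ⟨hsh, harr, hnd, hmemiff, hoilV, hclV⟩ := hR
  have hInij : InR n m (i, j) := ⟨hi, hi2, hj, hj2⟩
  have hcontains : PySem.Set.contains b.1 (i, j) = vget a.1 i j := by
    by_cases h : (i, j) ∈ b.1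
    · have h1 : PySem.Set.contains b.1 (i, j) = true := (PySem.Set.contains_iff _ _).2 h
      have h2 : vget a.1 i j = true := (hmemiff (i, j) hInij).2 h
      rw [h1, h2]
    · have h1 : PySem.Set.contains b.1 (i, j) = false :=
        Bool.eq_false_iff.2 (fun hc => h ((PySem.Set.contains_iff _ _).1 hc))
      have h2 : vget a.1 i j = false :=
        Bool.eq_false_iff.2 (fun hv => h ((hmemiff (i, j) hInij).1 hv))
      rw [h1, h2]
  by_cases hland : landGet land i j = 1
  case neg =>
    have hg : (landGet land i j == 1) = false := by
      simp only [beq_eq_false_iff_ne, ne_eq]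
      exact hland
    rw [hg]
    simp only [Bool.false_and, if_neg Bool.false_ne_true]
    exact ⟨hsh, harr, hnd, hmemiff, hoilV, hclV⟩
  case pos =>
    have hg : (landGet land i j == 1) = true := beq_iff_eq.mpr hland
    by_cases hvis : vget a.1 i j = true
    · rw [hg, hcontains, hvis]
      simp only [Bool.not_true, Bool.and_false,
        if_neg Bool.false_ne_true]
      exact ⟨hsh, harr, hnd, hmemiff, hoilV, hclV⟩
    · have hvf : vget a.1 i j = false := by simpa using hvis
      have hbnot : (i, j) ∉ b.1 := fun h => hvis ((hmemiff (i, j) hInij).2 h)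
      rw [hg, hcontains, hvf]
      simp only [Bool.true_and, Bool.not_false]
      -- characterize A's flood
      have hoilseed : Oil land n m (i, j) := ⟨hInij, hland⟩
      obtain ⟨M, hndM, hoilM, hmemM, heqA⟩ := bfsLoop_spec land n m
        (5 * (n.toNat * m.toNat) + 1) a.1 [(i, j)] 0 j j hsh
        (by intro c hc; rw [List.mem_singleton] at hc; subst hc; exact hoilseed)
        (by have := ucount_le hsh; simp only [List.length_cons, List.length_nil]; omega)
      -- characterize B's saturation
      obtain ⟨s1, s2, s3, s4, s5⟩ := saturate_spec land n m (n.toNat * m.toNat + 1)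
        (PySem.Set.ofList [(i, j)]) (PySem.Set.nodup_ofList _)
        (by intro c hc; rw [PySem.Set.mem_ofList, List.mem_singleton] at hc;
            subst hc; exact hoilseed)
        (by omega)
      set S := saturate land n m (n.toNat * m.toNat + 1) (PySem.Set.ofList [(i, j)])
        with hSdef
      have hseedS : (i, j) ∈ S :=
        s2 (i, j) (by rw [PySem.Set.mem_ofList]; exact List.mem_singleton.2 rfl)
      have hSmem : ∀ x, x ∈ S ↔ Reach land n m (fun _ => False) (i, j) x := by
        intro x
        constructor
        · intro hx
          obtain ⟨w, hw, hr⟩ := s5 x hx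
          rw [PySem.Set.mem_ofList, List.mem_singleton] at hw
          subst hw
          exact hr
        · exact reach_subset_closed s4 hseedS
      have hMmem : ∀ x, x ∈ M ↔ Reach land n m (fun _ => False) (i, j) x := by
        intro x
        rw [hmemM x]
        constructor
        · rintro ⟨w, hw, hr⟩
          rw [List.mem_singleton] at hw
          subst hw
          have hr2 : Reach land n m (fun c => c ∈ b.1) (i, j) x :=
            reach_congr (fun y hy => hmemiff y hy.1) hr
          exact reach_mono (fun y hy => False.elim hy) hr2
        · intro hr
          refine ⟨(i, j), List.mem_singleton.2 rfl, ?_⟩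
          have hr2 : Reach land n m (fun c => c ∈ b.1) (i, j) x :=
            reach_false_to_avoid hclV hbnot hr
          exact reach_congr (fun y hy => (hmemiff y hy.1).symm) hr2
      have hMS : ∀ x, x ∈ M ↔ x ∈ S := fun x => (hMmem x).trans (hSmem x).symm
      have hperm : M.Perm S := by
        rw [List.perm_ext_iff_of_nodup hndM s1]
        exact hMS
      have hlen : M.length = S.length := hperm.length_eq
      have hseedM : (i, j) ∈ M := (hMmem _).2 (.refl _ hoilseed (fun h => h))
      have hjM : j ∈ M.map Prod.snd := List.mem_map.2 ⟨(i, j), hseedM, rfl⟩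
      have hpermsnd : (M.map Prod.snd).Perm (S.map Prod.snd) := hperm.map _
      -- min
      have hSne : S.map Prod.snd ≠ [] := by
        intro h
        have : j ∈ S.map Prod.snd := List.mem_map.2 ⟨(i, j), hseedS, rfl⟩
        rw [h] at this
        simp at this
      obtain ⟨lo, hlo⟩ := Option.ne_none_iff_exists'.1
        (show PySem.List.min? (S.map Prod.snd) (fun x : Int => x) ≠ none from
          fun h => hSne ((PySem.List.min?_eq_none_iff _ _).1 h))
      obtain ⟨hi', hhi⟩ := Option.ne_none_iff_exists'.1
        (show PySem.List.max? (S.map Prod.snd) (fun x : Int => x) ≠ none from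
          fun h => hSne ((PySem.List.max?_eq_none_iff _ _).1 h))
      have hmn : (M.map Prod.snd).foldl min j = lo := by
        have hloM : lo ∈ M.map Prod.snd :=
          (hpermsnd.mem_iff).2 (PySem.List.min?_mem hlo)
        have h1 := PySem.List.foldl_min_le (M.map Prod.snd) j
        have hmnmem : (M.map Prod.snd).foldl min j ∈ M.map Prod.snd := by
          rcases PySem.List.foldl_min_mem (M.map Prod.snd) j with h | h
          · rw [h]; exact hjM
          · exact h
        have h2 := PySem.List.min?_isMin hlo _ ((hpermsnd.mem_iff).1 hmnmem)
        exact le_antisymm (h1.2 lo hloM) h2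
      have hmx : (M.map Prod.snd).foldl max j = hi' := by
        have hhiM : hi' ∈ M.map Prod.snd :=
          (hpermsnd.mem_iff).2 (PySem.List.max?_mem hhi)
        have h1 := PySem.List.le_foldl_max (M.map Prod.snd) j
        have hmxmem : (M.map Prod.snd).foldl max j ∈ M.map Prod.snd := by
          rcases PySem.List.foldl_max_mem (M.map Prod.snd) j with h | h
          · rw [h]; exact hjM
          · exact h
        have h2 := PySem.List.max?_isMax hhi _ ((hpermsnd.mem_iff).1 hmxmem)
        exact le_antisymm h2 (h1.2 hi' hhiM)
      -- disjointness of S from b.1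
      have hSdisj : ∀ x ∈ S, x ∉ b.1 := by
        intro x hx
        have hr := (hSmem x).1 hx
        exact (reach_end (reach_false_to_avoid hclV hbnot hr)).2
      have hunion : PySem.Set.union b.1 S = b.1 ++ S := by
        rw [show PySem.Set.union b.1 S = PySem.Set.update b.1 S from rfl]
        exact PySem.Set.update_eq_append_of_disjoint _ _ s1 hSdisj
      -- assemble
      rw [heqA, hunion]
      simp only [if_true]
      refine ⟨?_, ?_, ?_, ?_, ?_, ?_⟩
      · exact shape_markAll hsh (fun c hc => (hoilM c hc).1)
      · rw [hmn, hmx, harr, hlo, hhi]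
        simp only [Option.getD_some, zero_add, hlen]
      · exact List.Nodup.append hnd s1 (fun x hx hxS => hSdisj x hxS hx)
      · intro c hc
        rw [vmem_markAll hsh (fun d hd => (hoilM d hd).1) hc]
        rw [List.mem_append]
        constructor
        · rintro (h | h)
          · exact Or.inl ((hmemiff c hc).1 h)
          · exact Or.inr ((hMS c).1 h)
        · rintro (h | h)
          · exact Or.inl ((hmemiff c hc).2 h)
          · exact Or.inr ((hMS c).2 h)
      · intro c hc
        rcases List.mem_append.1 hc with h | h
        · exact hoilV c h
        · exact s3 c h
      · intro c hc d hadj hod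
        rcases List.mem_append.1 hc with h | h
        · exact List.mem_append_left _ (hclV c h d hadj hod)
        · exact List.mem_append_right _ (s4 c h d hadj hod)


theorem outer_init (land : List (List Int)) (n m : Int) :
    OuterInv land n m
      (List.replicate n.toNat (List.replicate m.toNat false), List.replicate m.toNat 0)
      (PySem.Set.empty, List.replicate m.toNat 0) := by
  refine ⟨⟨by simp, ?_⟩, rfl, ?_, ?_, ?_, ?_⟩
  · intro r hr
    rw [List.eq_of_mem_replicate hr]
    simp
  · exact List.nodup_nil
  · intro c _
    constructor
    · intro hv
      rw [vmem, vget_replicate] at hv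
      cases hv
    · intro hc
      cases hc
  · intro c hc
    cases hc
  · intro c hc
    cases hc

theorem outer_fold (land : List (List Int)) (n m : Int) :
    OuterInv land n m
      ((PySem.List.pyRange 0 n 1).foldl (fun st i =>
        (PySem.List.pyRange 0 m 1).foldl (fun st j =>
          if landGet land i j == 1 && !(vget st.1 i j) then
            let r := bfsLoop land n m (5 * (n.toNat * m.toNat) + 1) st.1 [(i, j)] 0 j j
            (r.1, bumpRange st.2 r.2.2.1 r.2.2.2 r.2.1)
          else st) st)
        (List.replicate n.toNat (List.replicate m.toNat false), List.replicate m.toNat 0))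
      ((PySem.List.pyRange 0 n 1).foldl
        (fun (st : PySem.Set (Int × Int) × List Int) i =>
        (PySem.List.pyRange 0 m 1).foldl (fun st j =>
          if landGet land i j == 1 && !(PySem.Set.contains st.1 (i, j)) then
            let comp := saturate land n m (n.toNat * m.toNat + 1)
              (PySem.Set.ofList [(i, j)])
            let cnt : Int := comp.length
            let lo := (PySem.List.min? (comp.map Prod.snd) (fun x => x)).getD 0
            let hi := (PySem.List.max? (comp.map Prod.snd) (fun x => x)).getD 0
            (PySem.Set.union st.1 comp, bumpRange st.2 lo hi cnt)
          else st) st)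
        (PySem.Set.empty, List.replicate m.toNat 0)) := by
  apply foldl_rel
  · exact outer_init land n m
  · intro i hi a b hR
    apply foldl_rel
    · exact hR
    · intro j hj a' b' hR'
      have hi' := PySem.List.mem_pyRange_one.1 hi
      have hj' := PySem.List.mem_pyRange_one.1 hj
      exact cell_step land hi'.1 hi'.2 hj'.1 hj'.2 a' b' hR'

theorem solution_eq_alt (land : List (List Int)) : solution land = solution_alt land := by
  exact congrArg (fun l => (PySem.List.max? l (fun x => x)).getD 0)
    (outer_fold land (land.length : Int)
      (((PySem.List.pyGet? land 0).getD []).length : Int)).2.1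

-- ===== VERDICT (by name: the statement is the Claim_ definition above) =====
theorem solution_spec : Claim_equal_solution := by
  intro land _ _
  unfold Spec_solution
  exact solution_eq_alt land
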